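-- pv_equiv track=rewrite | github.com/jithan-png/scout | backend/services/scoring_service.py | _type_score
-- ===== SOURCE A (Python) =====
-- from typing import List, Dict, Any, Optional
--
-- HIGH_OPP = {
--     "apartment highrise", "apartment", "commercial building", "mixed use",
--     "condo lowrise", "multifamily", "land development"
-- }
--
-- MEDIUM_OPP = {
--     "townhomes/row homes", "townhome", "single family dwelling",
--     "double family dwelling", "triplex", "fourplex", "institutional building"
-- }
--
-- LOW_OPP = {
--     "demolition", "industrial building", "renovation", "alteration",
--     "residential alteration", "commercial alteration"
-- }
--
-- def _type_score(permit_type: str, tags: List[str]) -> int: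
--     pt_lower = permit_type.lower().strip()
--
--     # Check tags first (more specific)
--     if any(t in tags for t in ["apartment", "condo", "commercial", "mixed_use", "land_dev"]):
--         return 20
--     if any(t in tags for t in ["townhome", "multifamily", "fourplex", "triplex", "duplex", "single_family"]):
--         return 14
--     if any(t in tags for t in ["demolition", "renovation"]):
--         return 8
--
--     # Fallback to raw permit type
--     if pt_lower in HIGH_OPP:    return 20
--     if pt_lower in MEDIUM_OPP:  return 14
--     if pt_lower in LOW_OPP:     return 8
--     return 10  # default
-- ===== SOURCE B (Python) =====
-- from typing import List
--
-- TAG_SCORES = {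
--     "apartment": 20, "condo": 20, "commercial": 20, "mixed_use": 20, "land_dev": 20,
--     "townhome": 14, "multifamily": 14, "fourplex": 14, "triplex": 14, "duplex": 14,
--     "single_family": 14,
--     "demolition": 8, "renovation": 8,
-- }
--
-- TYPE_SCORES = {
--     "apartment highrise": 20, "apartment": 20, "commercial building": 20,
--     "mixed use": 20, "condo lowrise": 20, "multifamily": 20, "land development": 20,
--     "townhomes/row homes": 14, "townhome": 14, "single family dwelling": 14,
--     "double family dwelling": 14, "triplex": 14, "fourplex": 14,
--     "institutional building": 14,
--     "demolition": 8, "industrial building": 8, "renovation": 8, "alteration": 8,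
--     "residential alteration": 8, "commercial alteration": 8,
-- }
--
-- def _type_score(permit_type: str, tags: List[str]) -> int:
--     best = 0
--     for t in tags:
--         s = TAG_SCORES.get(t, 0)
--         if s > best:
--             best = s
--     if best:
--         return best
--     return TYPE_SCORES.get(permit_type.lower().strip(), 10)
-- ===== Notes on version B (the rewrite author's own statement) =====
-- stated objective: simpler
-- what changed: Replaces three priority-ordered scans of candidate keyword lists over tags (and three set-membership fallbacks) with one table-driven pass: a single dict maps each tag keyword to its tier score, one max-accumulating loop over tags picks the best match, and the permit-type fallback is one dict lookup with default 10.
import Mathlib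
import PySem

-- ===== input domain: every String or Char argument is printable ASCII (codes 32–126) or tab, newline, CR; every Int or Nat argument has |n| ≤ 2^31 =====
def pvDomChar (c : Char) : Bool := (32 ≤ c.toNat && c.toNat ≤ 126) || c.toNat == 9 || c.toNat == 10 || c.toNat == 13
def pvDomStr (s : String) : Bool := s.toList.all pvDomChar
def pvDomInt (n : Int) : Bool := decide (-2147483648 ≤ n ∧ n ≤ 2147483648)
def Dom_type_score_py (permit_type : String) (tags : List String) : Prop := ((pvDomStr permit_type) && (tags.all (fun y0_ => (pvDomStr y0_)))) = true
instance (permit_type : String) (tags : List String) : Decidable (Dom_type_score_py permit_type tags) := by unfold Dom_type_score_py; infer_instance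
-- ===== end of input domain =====

-- B replaces A's three priority-ordered keyword scans and three set-membership fallbacks with
-- one tag-score dict, a single max-accumulating pass over tags, and one dict lookup (simpler).

-- ===== PORT A =====
def HIGH_OPP : PySem.Set String := PySem.Set.ofList
  ["apartment highrise", "apartment", "commercial building", "mixed use",
   "condo lowrise", "multifamily", "land development"]

def MEDIUM_OPP : PySem.Set String := PySem.Set.ofList
  ["townhomes/row homes", "townhome", "single family dwelling",
   "double family dwelling", "triplex", "fourplex", "institutional building"]

def LOW_OPP : PySem.Set String := PySem.Set.ofList
  ["demolition", "industrial building", "renovation", "alteration",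
   "residential alteration", "commercial alteration"]

def type_score_py (permit_type : String) (tags : List String) : Int :=
  let pt_lower := PySem.Str.strip (PySem.Str.lower permit_type)
  if ["apartment", "condo", "commercial", "mixed_use", "land_dev"].any
       (fun t => tags.contains t) then 20
  else if ["townhome", "multifamily", "fourplex", "triplex", "duplex", "single_family"].any
       (fun t => tags.contains t) then 14
  else if ["demolition", "renovation"].any (fun t => tags.contains t) then 8
  else if PySem.Set.contains HIGH_OPP pt_lower then 20
  else if PySem.Set.contains MEDIUM_OPP pt_lower then 14
  else if PySem.Set.contains LOW_OPP pt_lower then 8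
  else 10

-- ===== PORT B =====
def TAG_SCORES : PySem.Dict String Int := PySem.Dict.ofList
  [("apartment", 20), ("condo", 20), ("commercial", 20), ("mixed_use", 20), ("land_dev", 20),
   ("townhome", 14), ("multifamily", 14), ("fourplex", 14), ("triplex", 14), ("duplex", 14),
   ("single_family", 14),
   ("demolition", 8), ("renovation", 8)]

def TYPE_SCORES : PySem.Dict String Int := PySem.Dict.ofList
  [("apartment highrise", 20), ("apartment", 20), ("commercial building", 20),
   ("mixed use", 20), ("condo lowrise", 20), ("multifamily", 20), ("land development", 20),
   ("townhomes/row homes", 14), ("townhome", 14), ("single family dwelling", 14),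
   ("double family dwelling", 14), ("triplex", 14), ("fourplex", 14),
   ("institutional building", 14),
   ("demolition", 8), ("industrial building", 8), ("renovation", 8), ("alteration", 8),
   ("residential alteration", 8), ("commercial alteration", 8)]

def type_score_py_alt (permit_type : String) (tags : List String) : Int :=
  let best := tags.foldl
    (fun best t => let s := PySem.Dict.getD TAG_SCORES t 0; if s > best then s else best) 0
  if best ≠ 0 then best
  else PySem.Dict.getD TYPE_SCORES (PySem.Str.strip (PySem.Str.lower permit_type)) 10

-- ===== PRECONDITION & SPEC =====
def Spec_type_score_py (permit_type : String) (tags : List String) (out : Int) : Prop := out = type_score_py_alt permit_type tags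
instance (permit_type : String) (tags : List String) (out : Int) : Decidable (Spec_type_score_py permit_type tags out) := by unfold Spec_type_score_py; infer_instance

-- ===== CLAIM (what is proved, stated in full; the proofs are below) =====
def Claim_equal_type_score_py : Prop := ∀ (permit_type : String) (tags : List String), Dom_type_score_py permit_type tags → Spec_type_score_py permit_type tags (type_score_py permit_type tags)

-- ===== LEMMAS AND PROOFS =====

def hiTag (t : String) : Bool :=
  ["apartment", "condo", "commercial", "mixed_use", "land_dev"].contains t
def medTag (t : String) : Bool :=
  ["townhome", "multifamily", "fourplex", "triplex", "duplex", "single_family"].contains t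
def loTag (t : String) : Bool := ["demolition", "renovation"].contains t

-- the classification value A's branch structure induces on tags
def sup (tags : List String) : Int :=
  if tags.any hiTag then 20
  else if tags.any medTag then 14
  else if tags.any loTag then 8
  else 0

lemma tagScore_eq (t : String) :
    PySem.Dict.getD TAG_SCORES t 0 =
      if hiTag t then 20 else if medTag t then 14 else if loTag t then 8 else 0 := by
  have h : TAG_SCORES = PySem.Dict.mk
    [("apartment", 20), ("condo", 20), ("commercial", 20), ("mixed_use", 20), ("land_dev", 20),
     ("townhome", 14), ("multifamily", 14), ("fourplex", 14), ("triplex", 14), ("duplex", 14),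
     ("single_family", 14), ("demolition", 8), ("renovation", 8)] := by decide
  rw [PySem.Dict.getD_eq_get?_getD, h]
  clear h
  by_cases h1 : "apartment" = t; · subst h1; decide
  by_cases h2 : "condo" = t; · subst h2; decide
  by_cases h3 : "commercial" = t; · subst h3; decide
  by_cases h4 : "mixed_use" = t; · subst h4; decide
  by_cases h5 : "land_dev" = t; · subst h5; decide
  by_cases h6 : "townhome" = t; · subst h6; decide
  by_cases h7 : "multifamily" = t; · subst h7; decide
  by_cases h8 : "fourplex" = t; · subst h8; decide
  by_cases h9 : "triplex" = t; · subst h9; decide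
  by_cases h10 : "duplex" = t; · subst h10; decide
  by_cases h11 : "single_family" = t; · subst h11; decide
  by_cases h12 : "demolition" = t; · subst h12; decide
  by_cases h13 : "renovation" = t; · subst h13; decide
  simp [PySem.Dict.get?, hiTag, medTag, loTag, h1, h2, h3, h4, h5, h6, h7, h8, h9, h10,
    h11, h12, h13, Ne.symm h1, Ne.symm h2, Ne.symm h3, Ne.symm h4, Ne.symm h5, Ne.symm h6,
    Ne.symm h7, Ne.symm h8, Ne.symm h9, Ne.symm h10, Ne.symm h11, Ne.symm h12, Ne.symm h13]

lemma step_eq (b : Int) (t : String) :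
    (let s := PySem.Dict.getD TAG_SCORES t 0; if s > b then s else b)
      = max b (PySem.Dict.getD TAG_SCORES t 0) := by
  simp only []
  split_ifs with h <;> omega

lemma sup_cons (t : String) (ts : List String) :
    sup (t :: ts) = max (PySem.Dict.getD TAG_SCORES t 0) (sup ts) := by
  simp only [sup, List.any_cons, tagScore_eq]
  by_cases h1 : hiTag t <;> by_cases h2 : medTag t <;> by_cases h3 : loTag t <;>
    simp [h1, h2, h3] <;> split_ifs <;> first | rfl | decide

lemma foldl_max (tags : List String) (b : Int) (hb : 0 ≤ b) :
    tags.foldl (fun best t => max best (PySem.Dict.getD TAG_SCORES t 0)) b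
      = max b (sup tags) := by
  induction tags generalizing b with
  | nil => simp [sup, max_eq_left hb]
  | cons t ts ih =>
    rw [List.foldl_cons, ih _ (le_trans hb (le_max_left _ _)), sup_cons, max_assoc]

lemma foldl_eq_sup (tags : List String) :
    tags.foldl (fun best t =>
      let s := PySem.Dict.getD TAG_SCORES t 0; if s > best then s else best) 0
    = sup tags := by
  simp only [step_eq]
  rw [foldl_max tags 0 le_rfl]
  have : 0 ≤ sup tags := by unfold sup; split_ifs <;> omega
  omega

lemma anyA_hi (tags : List String) :
    (["apartment", "condo", "commercial", "mixed_use", "land_dev"].any fun t => tags.contains t)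
      = tags.any hiTag := by
  simp only [hiTag, List.any_eq, List.contains_eq_mem, decide_eq_decide, decide_eq_true_eq]
  constructor <;> rintro ⟨x, hx, hm⟩ <;> exact ⟨x, by simpa using hm, by simpa using hx⟩

lemma anyA_med (tags : List String) :
    (["townhome", "multifamily", "fourplex", "triplex", "duplex", "single_family"].any
        fun t => tags.contains t)
      = tags.any medTag := by
  simp only [medTag, List.any_eq, List.contains_eq_mem, decide_eq_decide, decide_eq_true_eq]
  constructor <;> rintro ⟨x, hx, hm⟩ <;> exact ⟨x, by simpa using hm, by simpa using hx⟩

lemma anyA_lo (tags : List String) :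
    (["demolition", "renovation"].any fun t => tags.contains t) = tags.any loTag := by
  simp only [loTag, List.any_eq, List.contains_eq_mem, decide_eq_decide, decide_eq_true_eq]
  constructor <;> rintro ⟨x, hx, hm⟩ <;> exact ⟨x, by simpa using hm, by simpa using hx⟩

lemma typeLookup_eq (s : String) :
    PySem.Dict.getD TYPE_SCORES s 10 =
      if PySem.Set.contains HIGH_OPP s then 20
      else if PySem.Set.contains MEDIUM_OPP s then 14
      else if PySem.Set.contains LOW_OPP s then 8
      else 10 := by
  have h : TYPE_SCORES = PySem.Dict.mk
    [("apartment highrise", 20), ("apartment", 20), ("commercial building", 20),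
     ("mixed use", 20), ("condo lowrise", 20), ("multifamily", 20), ("land development", 20),
     ("townhomes/row homes", 14), ("townhome", 14), ("single family dwelling", 14),
     ("double family dwelling", 14), ("triplex", 14), ("fourplex", 14),
     ("institutional building", 14),
     ("demolition", 8), ("industrial building", 8), ("renovation", 8), ("alteration", 8),
     ("residential alteration", 8), ("commercial alteration", 8)] := by decide
  rw [PySem.Dict.getD_eq_get?_getD, h]
  clear h
  by_cases h1 : "apartment highrise" = s; · subst h1; decide
  by_cases h2 : "apartment" = s; · subst h2; decide
  by_cases h3 : "commercial building" = s; · subst h3; decide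
  by_cases h4 : "mixed use" = s; · subst h4; decide
  by_cases h5 : "condo lowrise" = s; · subst h5; decide
  by_cases h6 : "multifamily" = s; · subst h6; decide
  by_cases h7 : "land development" = s; · subst h7; decide
  by_cases h8 : "townhomes/row homes" = s; · subst h8; decide
  by_cases h9 : "townhome" = s; · subst h9; decide
  by_cases h10 : "single family dwelling" = s; · subst h10; decide
  by_cases h11 : "double family dwelling" = s; · subst h11; decide
  by_cases h12 : "triplex" = s; · subst h12; decide
  by_cases h13 : "fourplex" = s; · subst h13; decide
  by_cases h14 : "institutional building" = s; · subst h14; decide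
  by_cases h15 : "demolition" = s; · subst h15; decide
  by_cases h16 : "industrial building" = s; · subst h16; decide
  by_cases h17 : "renovation" = s; · subst h17; decide
  by_cases h18 : "alteration" = s; · subst h18; decide
  by_cases h19 : "residential alteration" = s; · subst h19; decide
  by_cases h20 : "commercial alteration" = s; · subst h20; decide
  simp [PySem.Dict.get?, PySem.Set.contains, HIGH_OPP, MEDIUM_OPP, LOW_OPP, PySem.Set.ofList,
    h1, h2, h3, h4, h5, h6, h7, h8, h9, h10, h11, h12, h13, h14, h15, h16, h17, h18, h19, h20,
    Ne.symm h1, Ne.symm h2, Ne.symm h3, Ne.symm h4, Ne.symm h5, Ne.symm h6, Ne.symm h7,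
    Ne.symm h8, Ne.symm h9, Ne.symm h10, Ne.symm h11, Ne.symm h12, Ne.symm h13, Ne.symm h14,
    Ne.symm h15, Ne.symm h16, Ne.symm h17, Ne.symm h18, Ne.symm h19, Ne.symm h20]

-- ===== VERDICT (by name: the statement is the Claim_ definition above) =====
theorem type_score_py_spec : Claim_equal_type_score_py := by
  intro permit_type tags _
  show type_score_py permit_type tags = type_score_py_alt permit_type tags
  simp only [type_score_py, type_score_py_alt, foldl_eq_sup, anyA_hi, anyA_med, anyA_lo,
    typeLookup_eq, sup]
  split_ifs <;> omega
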